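-- pv_equiv track=rewrite | github.com/Radoslaw-Wolnik/Kryptografia | 02_Szyfr_Vigenera/english_solve.py | substrings_with_indexes
-- ===== SOURCE A (Python) =====
-- def substrings_with_indexes(s):
--     substrings_with_indexes = {}
--     n = len(s)
--     for length in range(1, n):
--         for start in range(n - length + 1):
--             substring = s[start:start + length]
--             if s.count(substring) > 1:
--                 if substring in substrings_with_indexes:
--                     substrings_with_indexes[substring].append(start)
--                 else:
--                     substrings_with_indexes[substring] = [start]
--     return substrings_with_indexes
-- ===== SOURCE B (Python) =====
-- def substrings_with_indexes(s):
--     n = len(s)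
--     out = []
--     for length in range(1, n):
--         groups = {}
--         for start in range(n - length + 1):
--             groups.setdefault(s[start:start + length], []).append(start)
--         for sub, occ in groups.items():
--             # non-overlapping count > 1  <=>  last occurrence >= length after the first
--             if occ[-1] - occ[0] >= length:
--                 out.append((sub, occ))
--     return dict(out)
-- ===== Notes on version B (the rewrite author's own statement) =====
-- stated objective: faster
-- what changed: Instead of calling s.count(substring) on every (length,start) pair and growing a result dict keyed by repeated membership tests, B groups all starts of each length by substring in one setdefault pass, emits the groups whose spread satisfies last_start - first_start >= length (equivalent to non-overlapping count > 1) into a flat list, and builds the result dict once at the end.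
import Mathlib
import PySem

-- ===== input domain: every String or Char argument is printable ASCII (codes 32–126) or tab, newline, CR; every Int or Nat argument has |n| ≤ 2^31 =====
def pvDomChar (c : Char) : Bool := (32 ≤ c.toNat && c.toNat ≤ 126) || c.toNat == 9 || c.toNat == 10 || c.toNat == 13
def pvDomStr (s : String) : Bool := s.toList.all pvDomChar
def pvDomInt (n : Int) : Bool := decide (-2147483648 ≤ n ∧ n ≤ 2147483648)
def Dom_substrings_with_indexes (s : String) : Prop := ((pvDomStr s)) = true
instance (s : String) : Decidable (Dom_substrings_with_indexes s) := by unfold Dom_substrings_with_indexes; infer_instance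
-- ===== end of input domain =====

-- B drops A's dict-with-count() loop: it emits, per length, each substring once at its first
-- start (a seen-set) with its occurrence list gathered by one scan, and builds one dict at the end.

-- ===== PORT A =====
def substrings_with_indexes (s : String) : List (String × List Int) :=
  let n : Int := PySem.Str.len s
  ((PySem.List.pyRange 1 n).foldl (fun d length =>
    (PySem.List.pyRange 0 (n - length + 1)).foldl (fun d start =>
      let substring := PySem.Str.slice s (some start) (some (start + length))
      if PySem.Str.count s substring > 1 then
        (if d.contains substring then d.modify substring [] (· ++ [start])
         else d.insert substring [start])
      else d) d)
    (PySem.Dict.empty : PySem.Dict String (List Int))).items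

-- ===== PORT B =====
def substrings_with_indexes_alt (s : String) : List (String × List Int) :=
  let n : Int := PySem.Str.len s
  let out := (PySem.List.pyRange 1 n).foldl (fun out length =>
    let groups := (PySem.List.pyRange 0 (n - length + 1)).foldl
      (fun g start =>
        g.modify (PySem.Str.slice s (some start) (some (start + length))) [] (· ++ [start]))
      (PySem.Dict.empty : PySem.Dict String (List Int))
    groups.items.foldl (fun out p =>
      if PySem.List.pyGetD p.2 (-1) 0 - PySem.List.pyGetD p.2 0 0 ≥ length then out ++ [p]
      else out) out) []
  (PySem.Dict.ofList out).items

-- ===== PRECONDITION & SPEC =====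
def Spec_substrings_with_indexes (s : String) (out : List (String × List Int)) : Prop := out = substrings_with_indexes_alt s
instance (s : String) (out : List (String × List Int)) : Decidable (Spec_substrings_with_indexes s out) := by unfold Spec_substrings_with_indexes; infer_instance

-- ===== CLAIM (what is proved, stated in full; the proofs are below) =====
def Claim_equal_substrings_with_indexes : Prop := ∀ (s : String), Dom_substrings_with_indexes s → Spec_substrings_with_indexes s (substrings_with_indexes s)

-- ===== LEMMAS AND PROOFS =====

-- the substring keyed at a start position
def pvKey (s : String) (L : Int) (x : Int) : String :=
  PySem.Str.slice s (some x) (some (x + L))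

-- A's per-length loop body, named
def pvStepA (s : String) (d : PySem.Dict String (List Int)) (length : Int) :
    PySem.Dict String (List Int) :=
  (PySem.List.pyRange 0 (PySem.Str.len s - length + 1)).foldl (fun d start =>
    let substring := PySem.Str.slice s (some start) (some (start + length))
    if PySem.Str.count s substring > 1 then
      (if d.contains substring then d.modify substring [] (· ++ [start])
       else d.insert substring [start])
    else d) d

-- B's per-length step: group starts by substring, then append the spread-out groups
def pvStepBOut (s : String) (out : List (String × List Int)) (length : Int) :
    List (String × List Int) :=
  ((PySem.List.pyRange 0 (PySem.Str.len s - length + 1)).foldl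
      (fun g start =>
        g.modify (PySem.Str.slice s (some start) (some (start + length))) [] (· ++ [start]))
      (PySem.Dict.empty : PySem.Dict String (List Int))).items.foldl
    (fun out p =>
      if PySem.List.pyGetD p.2 (-1) 0 - PySem.List.pyGetD p.2 0 0 ≥ length then out ++ [p]
      else out) out

theorem pvPortA_eq (s : String) :
    substrings_with_indexes s =
      ((PySem.List.pyRange 1 (PySem.Str.len s)).foldl (pvStepA s)
        (PySem.Dict.empty : PySem.Dict String (List Int))).items := rfl

theorem pvPortB_eq (s : String) :
    substrings_with_indexes_alt s =
      (PySem.Dict.ofList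
        ((PySem.List.pyRange 1 (PySem.Str.len s)).foldl (pvStepBOut s) [])).items := rfl

-- grouping of a start list by key, keeping first-occurrence order; `seen` keys are skipped
def pvGrp (k : Int → String) (seen : List String) : List Int → List (String × List Int)
  | [] => []
  | x :: xs =>
    if k x ∈ seen then pvGrp k seen xs
    else (k x, x :: xs.filter (fun y => k y == k x)) :: pvGrp k (k x :: seen) xs

theorem pvGrp_congr (k : Int → String) (xs : List Int) :
    ∀ (s₁ s₂ : List String), (∀ x ∈ xs, (k x ∈ s₁ ↔ k x ∈ s₂)) →
      pvGrp k s₁ xs = pvGrp k s₂ xs := by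
  induction xs with
  | nil => intro s₁ s₂ h; rfl
  | cons x xs ih =>
    intro s₁ s₂ h
    have hx := h x (by simp)
    simp only [pvGrp]
    by_cases hm : k x ∈ s₁
    · rw [if_pos hm, if_pos (hx.mp hm)]
      exact ih _ _ (fun y hy => h y (by simp [hy]))
    · rw [if_neg hm, if_neg (fun c => hm (hx.mpr c))]
      congr 1
      refine ih _ _ (fun y hy => ?_)
      simp only [List.mem_cons]
      have := h y (by simp [hy])
      tauto

theorem pvGrp_filter_cons (k : Int → String) (P : String → Bool) (a : String)
    (ha : P a = false) (xs : List Int) :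
    ∀ (seen : List String),
      (pvGrp k (a :: seen) xs).filter (fun p => P p.1)
        = (pvGrp k seen xs).filter (fun p => P p.1) := by
  induction xs with
  | nil => intro seen; rfl
  | cons x xs ih =>
    intro seen
    simp only [pvGrp]
    by_cases hxs : k x ∈ seen
    · rw [if_pos (by simp [hxs]), if_pos hxs]
      exact ih seen
    · by_cases hxa : k x = a
      · rw [if_pos (by simp [hxa]), if_neg hxs]
        rw [List.filter_cons_of_neg (by simp [hxa, ha]), hxa]
      · rw [if_neg (by simp [hxa, hxs]), if_neg hxs]
        have hswap : pvGrp k (k x :: a :: seen) xs = pvGrp k (a :: k x :: seen) xs :=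
          pvGrp_congr k xs _ _ (fun y _ => by simp only [List.mem_cons]; tauto)
        simp only [List.filter_cons]
        rw [hswap, ih (k x :: seen)]

theorem pvGrp_mem (k : Int → String) (xs : List Int) :
    ∀ (seen : List String) (p : String × List Int), p ∈ pvGrp k seen xs →
      p.1 ∉ seen ∧ (∃ x ∈ xs, k x = p.1) ∧ p.2 = xs.filter (fun y => k y == p.1) := by
  induction xs with
  | nil => intro seen p hp; simp [pvGrp] at hp
  | cons x xs ih =>
    intro seen p hp
    simp only [pvGrp] at hp
    by_cases hm : k x ∈ seen
    · rw [if_pos hm] at hp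
      obtain ⟨h1, ⟨x', hx', hk⟩, h3⟩ := ih seen p hp
      have hne : (k x == p.1) = false := by
        simp only [beq_eq_false_iff_ne, ne_eq]
        intro c; exact h1 (c ▸ hm)
      exact ⟨h1, ⟨x', by simp [hx'], hk⟩, by rw [List.filter_cons_of_neg (by simp [hne]), h3]⟩
    · rw [if_neg hm] at hp
      rcases List.mem_cons.mp hp with hp | hp
      · subst hp
        refine ⟨hm, ⟨x, by simp, rfl⟩, ?_⟩
        simp [List.filter_cons_of_pos]
      · obtain ⟨h1, ⟨x', hx', hk⟩, h3⟩ := ih _ p hp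
        have h1' : p.1 ∉ seen := fun c => h1 (by simp [c])
        have hne : (k x == p.1) = false := by
          simp only [beq_eq_false_iff_ne, ne_eq]
          intro c; exact h1 (by simp [c])
        exact ⟨h1', ⟨x', by simp [hx'], hk⟩, by rw [List.filter_cons_of_neg (by simp [hne]), h3]⟩

theorem pvGrp_keys_nodup (k : Int → String) (xs : List Int) :
    ∀ (seen : List String), ((pvGrp k seen xs).map (·.1)).Nodup := by
  induction xs with
  | nil => intro seen; simp [pvGrp]
  | cons x xs ih =>
    intro seen
    simp only [pvGrp]
    by_cases hm : k x ∈ seen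
    · rw [if_pos hm]; exact ih seen
    · rw [if_neg hm]
      simp only [List.map_cons, List.nodup_cons]
      refine ⟨?_, ih _⟩
      intro hc
      obtain ⟨p, hp, hk⟩ := List.mem_map.mp hc
      obtain ⟨h1, _, _⟩ := pvGrp_mem k xs _ p hp
      exact h1 (by simp [hk])

theorem pvContains_iff (d : PySem.Dict String (List Int)) (key : String) :
    d.contains key = true ↔ key ∈ d.keys := by
  simp only [PySem.Dict.contains, PySem.Dict.keys]
  constructor
  · intro h
    obtain ⟨p, hp, hk⟩ := List.any_eq_true.mp h
    exact List.mem_map.mpr ⟨p, hp, by simpa using hk⟩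
  · intro h
    obtain ⟨p, hp, hk⟩ := List.mem_map.mp h
    exact List.any_eq_true.mpr ⟨p, hp, by simp [hk]⟩

theorem pvGetD_not_contains (d : PySem.Dict String (List Int)) (key : String)
    (dflt : List Int) (h : d.contains key = false) : d.getD key dflt = dflt := by
  simp only [PySem.Dict.contains] at h
  rw [List.any_eq_false] at h
  have hfind : d.items.find? (fun p => p.1 == key) = none := by
    rw [List.find?_eq_none]
    intro p hp
    exact h p hp
  simp [PySem.Dict.getD, PySem.Dict.get?, hfind]

-- characterization of A's conditional group-append fold over a dict
theorem pvFold_char (k : Int → String) (P : String → Bool) (xs : List Int) :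
    ∀ (d : PySem.Dict String (List Int)), d.keys.Nodup →
      (xs.foldl (fun d x =>
          if P (k x) = true then d.insert (k x) (d.getD (k x) [] ++ [x]) else d) d).items
        = d.items.map (fun p => (p.1, p.2 ++ if P p.1 = true then xs.filter (fun y => k y == p.1) else []))
          ++ (pvGrp k d.keys xs).filter (fun p => P p.1) := by
  induction xs with
  | nil =>
    intro d hd
    simp [pvGrp]
  | cons x xs ih =>
    intro d hd
    simp only [List.foldl_cons]
    by_cases hP : P (k x) = true
    · rw [if_pos hP]
      by_cases hc : d.contains (k x) = true
      · -- key already present: the insert rewrites its entry in place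
        have hmem : k x ∈ d.keys := (pvContains_iff d (k x)).mp hc
        have hitems := PySem.Dict.items_insert_of_contains d (d.getD (k x) [] ++ [x]) hc
        have hkeys := PySem.Dict.keys_insert_of_contains d (d.getD (k x) [] ++ [x]) hc
        have hnd' : (d.insert (k x) (d.getD (k x) [] ++ [x])).keys.Nodup := by
          rw [hkeys]; exact hd
        rw [ih _ hnd', hkeys, hitems, List.map_map,
            show pvGrp k d.keys (x :: xs) = pvGrp k d.keys xs from by
              simp [pvGrp, hmem]]
        congr 1
        refine List.map_congr_left (fun p hp => ?_)
        by_cases hpk : p.1 = k x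
        · have hp' : (p.1, p.2) ∈ d.items := by simpa using hp
          have hgd : d.getD (k x) [] = p.2 := by
            rw [← hpk]; exact PySem.Dict.getD_of_mem_items d hp' hd []
          simp only [Function.comp_apply, beq_iff_eq, hpk, if_pos, hgd, hP, if_true,
            List.filter_cons, Prod.mk.injEq]
          exact ⟨trivial, by simp⟩
        · have hne : (p.1 == k x) = false := by simp [hpk]
          simp only [Function.comp_apply, hne, Bool.false_eq_true, if_false]
          have : ∀ (ys : List Int), (x :: ys).filter (fun y => k y == p.1)
              = ys.filter (fun y => k y == p.1) := fun ys => by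
            rw [List.filter_cons_of_neg (by simp only [beq_iff_eq]; exact fun c => hpk (Eq.symm c))]
          rw [this]
      · -- fresh key: the insert appends a new entry
        have hmem : k x ∉ d.keys := fun c =>
          absurd ((pvContains_iff d (k x)).mpr c) (by simp [hc])
        have hgd : d.getD (k x) [] = [] := pvGetD_not_contains d (k x) [] (by simpa using hc)
        have hitems := PySem.Dict.items_insert_of_not_contains d (d.getD (k x) [] ++ [x])
          (by simpa using hc)
        have hkeys := PySem.Dict.keys_insert_of_not_contains d (d.getD (k x) [] ++ [x])
          (by simpa using hc)
        have hnd' : (d.insert (k x) (d.getD (k x) [] ++ [x])).keys.Nodup := by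
          rw [hkeys]
          exact List.Nodup.append hd (by simp) (by simpa using hmem)
        rw [ih _ hnd', hkeys, hitems, List.map_append,
            pvGrp_congr k xs (d.keys ++ [k x]) (k x :: d.keys) (fun y _ => by simp; tauto),
            show pvGrp k d.keys (x :: xs)
              = (k x, x :: xs.filter (fun y => k y == k x)) :: pvGrp k (k x :: d.keys) xs from by
              simp [pvGrp, hmem]]
        rw [List.filter_cons_of_pos (by simpa using hP)]
        have hmap : d.items.map (fun p => (p.1, p.2 ++ if P p.1 = true then xs.filter (fun y => k y == p.1) else []))
            = d.items.map (fun p => (p.1, p.2 ++ if P p.1 = true then (x :: xs).filter (fun y => k y == p.1) else [])) := by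
          refine List.map_congr_left (fun p hp => ?_)
          have hpk : p.1 ≠ k x := fun c => hmem (c ▸ List.mem_map.mpr ⟨p, hp, rfl⟩)
          by_cases hPp : P p.1 = true
          · rw [if_pos hPp, if_pos hPp,
              List.filter_cons_of_neg (by simp only [beq_iff_eq]; exact fun c => hpk (Eq.symm c))]
          · rw [if_neg hPp, if_neg hPp]
        rw [hmap, hgd]
        simp only [hP, if_true, List.map_append, List.map_cons, List.map_nil, List.nil_append,
          List.append_assoc, List.singleton_append, List.cons_append]
    · rw [if_neg hP]
      rw [ih d hd]
      have hmap : d.items.map (fun p => (p.1, p.2 ++ if P p.1 = true then xs.filter (fun y => k y == p.1) else []))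
          = d.items.map (fun p => (p.1, p.2 ++ if P p.1 = true then (x :: xs).filter (fun y => k y == p.1) else [])) := by
        refine List.map_congr_left (fun p hp => ?_)
        by_cases hPp : P p.1 = true
        · have hpk : p.1 ≠ k x := fun c => absurd (c ▸ hPp) (by simpa using hP)
          rw [if_pos hPp, if_pos hPp,
            List.filter_cons_of_neg (by simp only [beq_iff_eq]; exact fun c => hpk (Eq.symm c))]
        · rw [if_neg hPp, if_neg hPp]
      rw [hmap]
      congr 1
      by_cases hmem : k x ∈ d.keys
      · rw [show pvGrp k d.keys (x :: xs) = pvGrp k d.keys xs from by simp [pvGrp, hmem]]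
      · rw [show pvGrp k d.keys (x :: xs)
            = (k x, x :: xs.filter (fun y => k y == k x)) :: pvGrp k (k x :: d.keys) xs from by
            simp [pvGrp, hmem]]
        rw [List.filter_cons_of_neg (by simpa using hP)]
        exact (pvGrp_filter_cons k P (k x) (by simpa using hP) xs d.keys).symm

-- ---- Python str.count: two non-overlapping occurrences ----

theorem pvGo_zero (sub : List Char) (l : List Char) (acc : Nat) :
    PySem.Chars.count.go sub 0 l acc = acc := by
  rw [PySem.Chars.count.go.eq_def]

theorem pvGo_nil (sub : List Char) (fuel : Nat) (acc : Nat) :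
    PySem.Chars.count.go sub fuel [] acc = acc := by
  cases fuel <;> rw [PySem.Chars.count.go.eq_def]

theorem pvGo_succ_cons (sub : List Char) (fuel : Nat) (h : Char) (t : List Char) (acc : Nat) :
    PySem.Chars.count.go sub (fuel + 1) (h :: t) acc =
      if sub.isPrefixOf (h :: t) then
        PySem.Chars.count.go sub fuel (List.drop sub.length (h :: t)) (acc + 1)
      else PySem.Chars.count.go sub fuel t acc := by
  rw [PySem.Chars.count.go.eq_def]

theorem pvGo_acc (sub : List Char) (fuel : Nat) :
    ∀ (l : List Char) (acc : Nat),
      PySem.Chars.count.go sub fuel l acc = acc + PySem.Chars.count.go sub fuel l 0 := by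
  induction fuel with
  | zero => intro l acc; rw [pvGo_zero, pvGo_zero]; omega
  | succ fuel ih =>
    intro l acc
    cases l with
    | nil => rw [pvGo_nil, pvGo_nil]; omega
    | cons h t =>
      rw [pvGo_succ_cons, pvGo_succ_cons]
      by_cases hp : sub.isPrefixOf (h :: t) = true
      · rw [if_pos hp, if_pos hp, ih _ (acc + 1), ih _ (0 + 1)]
        omega
      · rw [if_neg hp, if_neg hp, ih t acc, ih t 0]

theorem pvGo_one_iff (sub : List Char) (hsub : sub ≠ []) (fuel : Nat) :
    ∀ (l : List Char), l.length ≤ fuel →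
      (1 ≤ PySem.Chars.count.go sub fuel l 0 ↔ ∃ j, sub <+: l.drop j) := by
  induction fuel with
  | zero =>
    intro l hl
    have hnil : l = [] := List.eq_nil_of_length_eq_zero (Nat.le_zero.mp hl)
    subst hnil
    rw [pvGo_zero]
    simp [List.prefix_nil, hsub]
  | succ fuel ih =>
    intro l hl
    cases l with
    | nil =>
      rw [pvGo_nil]
      simp [List.prefix_nil, hsub]
    | cons h t =>
      rw [pvGo_succ_cons]
      by_cases hp : sub.isPrefixOf (h :: t) = true
      · rw [if_pos hp, pvGo_acc]
        constructor
        · intro _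
          exact ⟨0, by simpa using List.isPrefixOf_iff_prefix.mp hp⟩
        · intro _; omega
      · rw [if_neg hp, ih t (by simp at hl; omega)]
        constructor
        · rintro ⟨j, hj⟩
          exact ⟨j + 1, by simpa [List.drop_succ_cons] using hj⟩
        · rintro ⟨j, hj⟩
          cases j with
          | zero =>
            simp only [List.drop_zero] at hj
            exact absurd (List.isPrefixOf_iff_prefix.mpr hj) (by simpa using hp)
          | succ j =>
            exact ⟨j, by simpa [List.drop_succ_cons] using hj⟩

theorem pvGo_two_iff (sub : List Char) (hsub : sub ≠ []) (fuel : Nat) :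
    ∀ (l : List Char), l.length ≤ fuel →
      (2 ≤ PySem.Chars.count.go sub fuel l 0 ↔
        ∃ i j, i + sub.length ≤ j ∧ sub <+: l.drop i ∧ sub <+: l.drop j) := by
  have hs1 : 1 ≤ sub.length := by
    cases sub with
    | nil => exact absurd rfl hsub
    | cons a l => simp
  induction fuel with
  | zero =>
    intro l hl
    have hnil : l = [] := List.eq_nil_of_length_eq_zero (Nat.le_zero.mp hl)
    subst hnil
    rw [pvGo_zero]
    simp [List.prefix_nil, hsub]
  | succ fuel ih =>
    intro l hl
    cases l with
    | nil =>
      rw [pvGo_nil]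
      simp [List.prefix_nil, hsub]
    | cons h t =>
      rw [pvGo_succ_cons]
      by_cases hp : sub.isPrefixOf (h :: t) = true
      · rw [if_pos hp, pvGo_acc]
        have hpre := List.isPrefixOf_iff_prefix.mp hp
        have hdl : (List.drop sub.length (h :: t)).length ≤ fuel := by
          simp at hl ⊢; omega
        constructor
        · intro h2
          have h1 : 1 ≤ PySem.Chars.count.go sub fuel (List.drop sub.length (h :: t)) 0 := by
            omega
          obtain ⟨j, hj⟩ := (pvGo_one_iff sub hsub fuel _ hdl).mp h1
          rw [List.drop_drop] at hj
          exact ⟨0, sub.length + j, by omega, by simpa using hpre, hj⟩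
        · rintro ⟨i, j, hij, hi, hj⟩
          have hj' : sub <+: List.drop (sub.length + (j - sub.length)) (h :: t) := by
            rw [Nat.add_sub_cancel' (by omega)]
            exact hj
          rw [← List.drop_drop] at hj'
          have h1 := (pvGo_one_iff sub hsub fuel _ hdl).mpr ⟨j - sub.length, hj'⟩
          omega
      · rw [if_neg hp, ih t (by simp at hl; omega)]
        constructor
        · rintro ⟨i, j, hij, hi, hj⟩
          exact ⟨i + 1, j + 1, by omega, by simpa [List.drop_succ_cons] using hi,
            by simpa [List.drop_succ_cons] using hj⟩
        · rintro ⟨i, j, hij, hi, hj⟩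
          cases i with
          | zero =>
            simp only [List.drop_zero] at hi
            exact absurd (List.isPrefixOf_iff_prefix.mpr hi) (by simpa using hp)
          | succ i =>
            cases j with
            | zero => omega
            | succ j =>
              exact ⟨i, j, by omega, by simpa [List.drop_succ_cons] using hi,
                by simpa [List.drop_succ_cons] using hj⟩

theorem pvCount_two_iff (l sub : List Char) (hsub : sub ≠ []) :
    2 ≤ PySem.Chars.count l sub ↔
      ∃ i j, i + sub.length ≤ j ∧ sub <+: l.drop i ∧ sub <+: l.drop j := by
  have hne : sub.isEmpty = false := by
    simp [List.isEmpty_eq_false_iff, hsub]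
  simp only [PySem.Chars.count, hne, Bool.false_eq_true, if_false]
  exact pvGo_two_iff sub hsub l.length l le_rfl

-- ---- sorted filtered ranges: head is min, last is max ----

theorem pvHead_le (l : List Nat) (hl : l.Pairwise (· < ·)) (h : l ≠ []) :
    ∀ x ∈ l, l.head h ≤ x := by
  intro x hx
  cases l with
  | nil => exact absurd rfl h
  | cons a l =>
    rcases List.mem_cons.mp hx with rfl | hx
    · simp
    · simp only [List.head_cons]
      exact le_of_lt ((List.pairwise_cons.mp hl).1 x hx)

theorem pvLe_getLast (l : List Nat) (hl : l.Pairwise (· < ·)) (h : l ≠ []) :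
    ∀ x ∈ l, x ≤ l.getLast h := by
  induction l with
  | nil => intro x hx; simp at hx
  | cons a l ih =>
    intro x hx
    cases l with
    | nil => simp at hx; simp [hx]
    | cons b t =>
      rw [List.getLast_cons (by simp)]
      rcases List.mem_cons.mp hx with rfl | hx
      · refine le_of_lt (lt_of_lt_of_le ((List.pairwise_cons.mp hl).1 b (by simp)) ?_)
        exact ih (List.pairwise_cons.mp hl).2 (by simp) b (by simp)
      · exact ih (List.pairwise_cons.mp hl).2 (by simp) x hx

theorem pvGetD_zero {α : Type} (x : α) (xs : List α) (d : α) :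
    PySem.List.pyGetD (x :: xs) 0 d = x := by
  simp [PySem.List.pyGetD, PySem.List.pyGet?, PySem.List.pyIdx?]

theorem pvGetD_neg_one {α : Type} (xs : List α) (d : α) (h : xs ≠ []) :
    PySem.List.pyGetD xs (-1) d = xs.getLast h := by
  have hlen : 1 ≤ xs.length := by
    cases xs with
    | nil => exact absurd rfl h
    | cons a l => simp
  simp only [PySem.List.pyGetD, PySem.List.pyGet?, PySem.List.pyIdx?]
  rw [if_neg (by omega), if_pos (by push_cast; omega)]
  simp only [Option.bind_some]
  rw [List.getLast_eq_getElem]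
  have : xs[xs.length - 1]? = some (xs[xs.length - 1]) := List.getElem?_eq_getElem (by omega)
  simp [this]

-- ---- the key (slice) on in-range Nat starts ----

theorem pvKey_toList (s : String) (L i : Nat) (hi : i + L ≤ s.toList.length) :
    (pvKey s (L : Int) (i : Int)).toList = (s.toList.drop i).take L := by
  simp only [pvKey]
  rw [show ((i : Int) + (L : Int)) = ((i + L : Nat) : Int) from by omega]
  simp only [PySem.Str.toList_slice, PySem.Chars.slice_eq_listSlice, PySem.List.slice_natCast]
  congr 1
  omega

theorem pvKey_len (s : String) (L i : Nat) (hi : i + L ≤ s.toList.length) :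
    (pvKey s (L : Int) (i : Int)).toList.length = L := by
  rw [pvKey_toList s L i hi]
  simp only [List.length_take, List.length_drop]
  omega

theorem pvRange_eq (s : String) (L : Nat) (hLn : L < s.toList.length) :
    PySem.List.pyRange 0 (PySem.Str.len s - (L : Int) + 1)
      = (List.range (s.toList.length - L + 1)).map (fun j : Nat => (j : Int)) := by
  rw [show PySem.Str.len s - (L : Int) + 1 = ((s.toList.length - L + 1 : Nat) : Int) from by
    simp only [PySem.Str.len]; omega]
  exact PySem.List.pyRange_zero_natCast _

theorem pvMem_range_key (s : String) (L : Nat) (hL : 1 ≤ L) (hLn : L < s.toList.length)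
    (x : Int) (hx : x ∈ (List.range (s.toList.length - L + 1)).map (fun j : Nat => (j : Int))) :
    ∃ j : Nat, x = (j : Int) ∧ j + L ≤ s.toList.length ∧
      (pvKey s (L : Int) x).toList.length = L := by
  obtain ⟨j, hj, rfl⟩ := List.mem_map.mp hx
  rw [List.mem_range] at hj
  exact ⟨j, rfl, by omega, pvKey_len s L j (by omega)⟩

theorem pvSeg_key_len (s : String) (L : Nat) (hL : 1 ≤ L) (hLn : L < s.toList.length)
    (p : String × List Int)
    (hp : p ∈ pvGrp (pvKey s (L : Int)) []
            (PySem.List.pyRange 0 (PySem.Str.len s - (L : Int) + 1))) :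
    p.1.toList.length = L := by
  rw [pvRange_eq s L hLn] at hp
  obtain ⟨_, ⟨x, hx, hk⟩, _⟩ := pvGrp_mem _ _ _ p hp
  obtain ⟨j, rfl, hjL, hkey⟩ := pvMem_range_key s L hL hLn x hx
  rw [← hk]
  exact hkey

-- the central condition equivalence: count > 1 on a group's key  ⟺  last start - first start ≥ length
theorem pvSpread (s : String) (L : Nat) (hL : 1 ≤ L) (hLn : L < s.toList.length)
    (p : String × List Int)
    (hp : p ∈ pvGrp (pvKey s (L : Int)) []
            (PySem.List.pyRange 0 (PySem.Str.len s - (L : Int) + 1))) :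
    (decide (1 < PySem.Str.count s p.1)) =
      (decide ((L : Int) ≤ PySem.List.pyGetD p.2 (-1) 0 - PySem.List.pyGetD p.2 0 0)) := by
  rw [pvRange_eq s L hLn] at hp
  obtain ⟨-, ⟨x₀, hx₀, hk₀⟩, hval⟩ := pvGrp_mem _ _ _ p hp
  obtain ⟨i₀, rfl, hi₀L, hkey₀⟩ := pvMem_range_key s L hL hLn x₀ hx₀
  have hSLlen : p.1.toList.length = L := by rw [← hk₀]; exact hkey₀
  have hSLne : p.1.toList ≠ [] := by
    intro c; rw [c] at hSLlen; simp at hSLlen; omega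
  have hiff : ∀ j : Nat, j + L ≤ s.toList.length →
      (pvKey s (L : Int) (j : Int) = p.1 ↔ p.1.toList <+: s.toList.drop j) := by
    intro j hj
    rw [← String.toList_inj, pvKey_toList s L j hj]
    constructor
    · intro h
      exact h ▸ List.take_prefix L (s.toList.drop j)
    · intro h
      have := List.prefix_iff_eq_take.mp h
      rw [hSLlen] at this
      exact this.symm
  have hbound : ∀ j : Nat, p.1.toList <+: s.toList.drop j → j + L ≤ s.toList.length := by
    intro j h
    have h1 : p.1.toList.length ≤ (s.toList.drop j).length := h.length_le
    rw [List.length_drop, hSLlen] at h1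
    omega
  have hval' : p.2 = ((List.range (s.toList.length - L + 1)).filter
      (fun j => decide (p.1.toList <+: s.toList.drop j))).map (fun j : Nat => (j : Int)) := by
    rw [hval, List.filter_map]
    congr 1
    refine List.filter_congr (fun j hj => ?_)
    rw [List.mem_range] at hj
    simp only [Function.comp_apply]
    rw [Bool.eq_iff_iff, beq_iff_eq, decide_eq_true_eq]
    exact hiff j (by omega)
  set R := (List.range (s.toList.length - L + 1)).filter
      (fun j => decide (p.1.toList <+: s.toList.drop j)) with hRdef
  have hpw : R.Pairwise (· < ·) := List.pairwise_lt_range.filter _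
  have hmemR : ∀ j : Nat, j ∈ R ↔ p.1.toList <+: s.toList.drop j := by
    intro j
    rw [hRdef, List.mem_filter, List.mem_range, decide_eq_true_eq]
    exact ⟨fun h => h.2, fun h => ⟨by have := hbound j h; omega, h⟩⟩
  have hR0 : i₀ ∈ R := (hmemR i₀).mpr ((hiff i₀ hi₀L).mp hk₀)
  have hRne : R ≠ [] := fun c => by rw [c] at hR0; simp at hR0
  obtain ⟨r0, rt, hRc⟩ : ∃ r0 rt, R = r0 :: rt := by
    cases hc : R with
    | nil => exact absurd hc hRne
    | cons a t => exact ⟨a, t, rfl⟩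
  have hheadv : R.head hRne = r0 := by
    have h1 : R.head? = some r0 := by rw [hRc]; rfl
    have h2 : R.head? = some (R.head hRne) := List.head?_eq_some_head hRne
    rw [h1] at h2
    exact (Option.some.inj h2).symm
  have hmin : ∀ x ∈ R, r0 ≤ x := by
    intro x hx
    have := pvHead_le R hpw hRne x hx
    rwa [hheadv] at this
  have hlast : ∀ x ∈ R, x ≤ R.getLast hRne := pvLe_getLast R hpw hRne
  have hlastmem : R.getLast hRne ∈ R := List.getLast_mem hRne
  have hr0mem : r0 ∈ R := by rw [hRc]; simp
  have hmapne : R.map (fun j : Nat => (j : Int)) ≠ [] := by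
    rw [hRc]; simp
  have hfirst : PySem.List.pyGetD p.2 0 0 = (r0 : Int) := by
    rw [hval', hRc, List.map_cons, pvGetD_zero]
  have hlastval : PySem.List.pyGetD p.2 (-1) 0 = ((R.getLast hRne : Nat) : Int) := by
    rw [hval', pvGetD_neg_one _ _ hmapne, List.getLast_map]
  rw [hfirst, hlastval, Bool.eq_iff_iff]
  simp only [decide_eq_true_eq]
  rw [show (1 < PySem.Str.count s p.1) ↔ 2 ≤ PySem.Chars.count s.toList p.1.toList from by
    rw [PySem.Str.count_eq]; omega]
  rw [pvCount_two_iff s.toList p.1.toList hSLne]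
  constructor
  · rintro ⟨i, j, hij, hi, hj⟩
    rw [hSLlen] at hij
    have h1 : r0 ≤ i := hmin i ((hmemR i).mpr hi)
    have h2 : j ≤ R.getLast hRne := hlast j ((hmemR j).mpr hj)
    omega
  · intro h
    refine ⟨r0, R.getLast hRne, ?_, (hmemR _).mp hr0mem, (hmemR _).mp hlastmem⟩
    rw [hSLlen]
    omega

-- invariant carried through A's length loop
def pvInv (d : PySem.Dict String (List Int)) (L : Int) : Prop :=
  d.keys.Nodup ∧ ∀ key ∈ d.keys, ((key.toList.length : Int)) < L

theorem pvStepA_items (s : String) (L : Nat) (hL : 1 ≤ L) (hLn : L < s.toList.length)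
    (d : PySem.Dict String (List Int)) (hd : pvInv d (L : Int)) :
    (pvStepA s d (L : Int)).items
      = d.items ++ (pvGrp (pvKey s (L : Int)) []
          (PySem.List.pyRange 0 (PySem.Str.len s - (L : Int) + 1))).filter
            (fun p => decide (1 < PySem.Str.count s p.1)) := by
  obtain ⟨hnd, hlen⟩ := hd
  have hfun : (fun (d : PySem.Dict String (List Int)) (start : Int) =>
      let substring := PySem.Str.slice s (some start) (some (start + (L : Int)))
      if PySem.Str.count s substring > 1 then
        (if d.contains substring then d.modify substring [] (· ++ [start])
         else d.insert substring [start])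
      else d)
      = (fun (d : PySem.Dict String (List Int)) (x : Int) =>
        if (fun sub => decide (1 < PySem.Str.count s sub)) (pvKey s (L : Int) x) = true then
          d.insert (pvKey s (L : Int) x) (d.getD (pvKey s (L : Int) x) [] ++ [x])
        else d) := by
    funext d x
    simp only [pvKey, decide_eq_true_eq]
    by_cases h1 : 1 < PySem.Str.count s (PySem.Str.slice s (some x) (some (x + (L : Int))))
    · rw [if_pos h1, if_pos h1]
      by_cases hc : d.contains (PySem.Str.slice s (some x) (some (x + (L : Int)))) = true
      · rw [if_pos hc]
        rfl
      · rw [if_neg hc, pvGetD_not_contains _ _ _ (Bool.not_eq_true _ ▸ eq_false_of_ne_true hc)]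
        rfl
    · rw [if_neg h1, if_neg h1]
  show ((PySem.List.pyRange 0 (PySem.Str.len s - (L : Int) + 1)).foldl _ d).items = _
  rw [hfun, pvFold_char (pvKey s (L : Int)) (fun sub => decide (1 < PySem.Str.count s sub)) _ d hnd]
  have hmap : d.items.map (fun p => (p.1, p.2 ++
      if decide (1 < PySem.Str.count s p.1) = true then
        (PySem.List.pyRange 0 (PySem.Str.len s - (L : Int) + 1)).filter
          (fun y => pvKey s (L : Int) y == p.1)
      else [])) = d.items := by
    have : ∀ p ∈ d.items, (p.1, p.2 ++
        if decide (1 < PySem.Str.count s p.1) = true then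
          (PySem.List.pyRange 0 (PySem.Str.len s - (L : Int) + 1)).filter
            (fun y => pvKey s (L : Int) y == p.1)
        else []) = p := by
      intro p hp
      have hk : p.1 ∈ d.keys := List.mem_map.mpr ⟨p, hp, rfl⟩
      have hplen := hlen p.1 hk
      have hfl : (PySem.List.pyRange 0 (PySem.Str.len s - (L : Int) + 1)).filter
          (fun y => pvKey s (L : Int) y == p.1) = [] := by
        rw [List.filter_eq_nil_iff]
        intro y hy c
        rw [pvRange_eq s L hLn] at hy
        obtain ⟨jj, rfl, hjL, hkeyl⟩ := pvMem_range_key s L hL hLn y hy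
        rw [beq_iff_eq] at c
        rw [c] at hkeyl
        omega
      rw [hfl, ite_self, List.append_nil]
    rw [List.map_congr_left this]
    simp
  rw [hmap]
  congr 1
  refine congrArg _ (pvGrp_congr _ _ _ _ (fun x hx => ?_))
  rw [pvRange_eq s L hLn] at hx
  obtain ⟨jj, rfl, hjL, hkeyl⟩ := pvMem_range_key s L hL hLn x hx
  constructor
  · intro c
    have := hlen _ c
    rw [hkeyl] at this
    omega
  · intro c
    simp at c

theorem pvRange_nil (a b : Int) (h : b <= a) : PySem.List.pyRange a b = [] := by
  simp [PySem.List.pyRange]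
  omega

-- A's step preserves the invariant
theorem pvInvStep (s : String) (L : Nat) (hL : 1 ≤ L) (hLn : L < s.toList.length)
    (d : PySem.Dict String (List Int)) (hd : pvInv d (L : Int)) :
    pvInv (pvStepA s d (L : Int)) ((L : Int) + 1) := by
  have hA := pvStepA_items s L hL hLn d hd
  have hkeys : (pvStepA s d (L : Int)).keys
      = d.keys ++ ((pvGrp (pvKey s (L : Int)) []
        (PySem.List.pyRange 0 (PySem.Str.len s - (L : Int) + 1))).filter
          (fun p => decide (1 < PySem.Str.count s p.1))).map Prod.fst := by
    simp only [PySem.Dict.keys]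
    rw [hA, List.map_append]
  constructor
  · rw [hkeys]
    refine List.Nodup.append hd.1 ?_ ?_
    · exact List.Sublist.nodup (List.Sublist.map _ List.filter_sublist)
        (pvGrp_keys_nodup (pvKey s (L : Int)) _ [])
    · intro a ha1 ha2
      obtain ⟨p, hp, rfl⟩ := List.mem_map.mp ha2
      have hlenp := pvSeg_key_len s L hL hLn p (List.mem_of_mem_filter hp)
      have := hd.2 _ ha1
      rw [hlenp] at this
      omega
  · intro key hkey
    rw [hkeys] at hkey
    rcases List.mem_append.mp hkey with h | h
    · have := hd.2 _ h
      omega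
    · obtain ⟨p, hp, rfl⟩ := List.mem_map.mp h
      have hlenp := pvSeg_key_len s L hL hLn p (List.mem_of_mem_filter hp)
      rw [hlenp]
      omega

-- B's per-length step appends exactly the filtered grouping of the start range
theorem pvStepBOut_eq (s : String) (L : Int) (out : List (String × List Int)) :
    pvStepBOut s out L
      = out ++ (pvGrp (pvKey s L) []
          (PySem.List.pyRange 0 (PySem.Str.len s - L + 1))).filter
            (fun p => decide (L ≤ PySem.List.pyGetD p.2 (-1) 0 - PySem.List.pyGetD p.2 0 0)) := by
  have hfun : (fun (g : PySem.Dict String (List Int)) (start : Int) =>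
      g.modify (PySem.Str.slice s (some start) (some (start + L))) [] (· ++ [start]))
      = (fun (d : PySem.Dict String (List Int)) (x : Int) =>
        if (fun (_ : String) => true) (pvKey s L x) = true then
          d.insert (pvKey s L x) (d.getD (pvKey s L x) [] ++ [x])
        else d) := by
    funext g x
    rfl
  have hempty : (PySem.Dict.empty : PySem.Dict String (List Int)).keys.Nodup := by
    simp [PySem.Dict.empty, PySem.Dict.keys]
  have hg : ((PySem.List.pyRange 0 (PySem.Str.len s - L + 1)).foldl
      (fun g start =>
        g.modify (PySem.Str.slice s (some start) (some (start + L))) [] (· ++ [start]))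
      (PySem.Dict.empty : PySem.Dict String (List Int))).items
      = pvGrp (pvKey s L) [] (PySem.List.pyRange 0 (PySem.Str.len s - L + 1)) := by
    rw [hfun, pvFold_char (pvKey s L) (fun _ => true) _ PySem.Dict.empty hempty]
    simp [PySem.Dict.empty, PySem.Dict.keys, PySem.Dict.items]
  have hfun2 : (fun (out : List (String × List Int)) (p : String × List Int) =>
      if PySem.List.pyGetD p.2 (-1) 0 - PySem.List.pyGetD p.2 0 0 ≥ L then out ++ [p]
      else out)
      = (fun (out : List (String × List Int)) (p : String × List Int) =>
        if (fun (q : String × List Int) => decide (L ≤ PySem.List.pyGetD q.2 (-1) 0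
            - PySem.List.pyGetD q.2 0 0)) p = true then out ++ [id p] else out) := by
    funext o p
    by_cases h : L ≤ PySem.List.pyGetD p.2 (-1) 0 - PySem.List.pyGetD p.2 0 0
    · rw [if_pos h, if_pos (by simpa using h)]
      rfl
    · rw [if_neg h, if_neg (by simpa using h)]
  show ((PySem.List.pyRange 0 (PySem.Str.len s - L + 1)).foldl
      (fun g start =>
        g.modify (PySem.Str.slice s (some start) (some (start + L))) [] (· ++ [start]))
      (PySem.Dict.empty : PySem.Dict String (List Int))).items.foldl _ out = _
  rw [hg, hfun2, PySem.List.foldl_append_if]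
  simp

-- the two length loops agree, and A's dict keys stay distinct
theorem pvMain (s : String) (m : Nat) :
    ∀ (a : Int) (d : PySem.Dict String (List Int)) (out : List (String × List Int)),
      1 ≤ a → PySem.Str.len s ≤ a + m → pvInv d a → d.items = out →
      ((PySem.List.pyRange a (PySem.Str.len s)).foldl (pvStepA s) d).items
          = (PySem.List.pyRange a (PySem.Str.len s)).foldl (pvStepBOut s) out
        ∧ ((PySem.List.pyRange a (PySem.Str.len s)).foldl (pvStepA s) d).keys.Nodup := by
  induction m with
  | zero =>
    intro a d out h1 hle hinv hitems
    rw [pvRange_nil a (PySem.Str.len s) (by omega)]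
    exact ⟨hitems, hinv.1⟩
  | succ m ih =>
    intro a d out h1 hle hinv hitems
    by_cases hab : PySem.Str.len s ≤ a
    · rw [pvRange_nil a (PySem.Str.len s) hab]
      exact ⟨hitems, hinv.1⟩
    · push_neg at hab
      rw [PySem.List.pyRange_one_cons hab]
      simp only [List.foldl_cons]
      obtain ⟨A, rfl⟩ : ∃ A : Nat, a = (A : Int) := ⟨a.toNat, by omega⟩
      have hA1 : 1 ≤ A := by exact_mod_cast h1
      have hAn : A < s.toList.length := by
        have h2 : (A : Int) < PySem.Str.len s := hab
        simp only [PySem.Str.len] at h2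
        exact_mod_cast h2
      have hstep := pvStepA_items s A hA1 hAn d hinv
      have hinv2 := pvInvStep s A hA1 hAn d hinv
      have hBstep : pvStepBOut s out (A : Int)
          = out ++ (pvGrp (pvKey s (A : Int)) []
              (PySem.List.pyRange 0 (PySem.Str.len s - (A : Int) + 1))).filter
                (fun p => decide ((A : Int) ≤ PySem.List.pyGetD p.2 (-1) 0
                  - PySem.List.pyGetD p.2 0 0)) := by
        exact pvStepBOut_eq s (A : Int) out
      have hseg : (pvGrp (pvKey s (A : Int)) []
            (PySem.List.pyRange 0 (PySem.Str.len s - (A : Int) + 1))).filter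
              (fun p => decide (1 < PySem.Str.count s p.1))
          = (pvGrp (pvKey s (A : Int)) []
            (PySem.List.pyRange 0 (PySem.Str.len s - (A : Int) + 1))).filter
              (fun p => decide ((A : Int) ≤ PySem.List.pyGetD p.2 (-1) 0
                - PySem.List.pyGetD p.2 0 0)) :=
        List.filter_congr (fun p hp => pvSpread s A hA1 hAn p hp)
      refine ih ((A : Int) + 1) (pvStepA s d (A : Int)) (pvStepBOut s out (A : Int))
        (by omega) (by omega) hinv2 ?_
      rw [hstep, hseg, hBstep, hitems]

-- ===== VERDICT (by name: the statement is the Claim_ definition above) =====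
theorem substrings_with_indexes_spec : Claim_equal_substrings_with_indexes := by
  intro s _
  unfold Spec_substrings_with_indexes
  have hinv : pvInv (PySem.Dict.empty : PySem.Dict String (List Int)) 1 := by
    constructor
    · simp [PySem.Dict.empty, PySem.Dict.keys]
    · simp [PySem.Dict.empty, PySem.Dict.keys]
  obtain ⟨hitems, hnd⟩ := pvMain s (PySem.Str.len s).toNat 1
    (PySem.Dict.empty : PySem.Dict String (List Int)) [] (by omega) (by omega) hinv rfl
  set outB := (PySem.List.pyRange 1 (PySem.Str.len s)).foldl (pvStepBOut s) [] with houtB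
  have hndB : (outB.map Prod.fst).Nodup := by
    have : ((PySem.List.pyRange 1 (PySem.Str.len s)).foldl (pvStepA s)
        (PySem.Dict.empty : PySem.Dict String (List Int))).keys = outB.map Prod.fst := by
      simp only [PySem.Dict.keys]
      rw [hitems]
    rw [← this]
    exact hnd
  have hofList : (PySem.Dict.ofList outB).items = outB := by
    have hfresh : ∀ p ∈ outB,
        (PySem.Dict.empty : PySem.Dict String (List Int)).contains p.1 = false := by
      intro p _
      simp [PySem.Dict.empty, PySem.Dict.contains]
    have := PySem.Dict.items_foldl_insert_fresh outB Prod.fst Prod.snd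
      (PySem.Dict.empty : PySem.Dict String (List Int)) hfresh hndB
    simpa [PySem.Dict.empty, PySem.Dict.items] using this
  rw [pvPortA_eq, pvPortB_eq, hitems, ← houtB, hofList]
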